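-- pv_equiv track=rewrite | github.com/oceanbase/miniob | test/integration_test/util/myutil.py | rstrip_string_list
-- ===== SOURCE A (Python) =====
-- from typing import Dict, List
--
-- def rstrip_string_list(strs: List[str]) -> List[str]:
--   '''
--   去掉字符串列表中最后面的空字符串
--   '''
--   while len(strs) > 0:
--     s = strs[-1].strip()
--     if len(s) == 0:
--       strs = strs[ : -1]
--     else:
--       break
--   return strs
-- ===== SOURCE B (Python) =====
-- def rstrip_string_list(strs):
--   '''
--   去掉字符串列表中最后面的空字符串
--   '''
--   i = len(strs)
--   while i > 0 and not strs[i - 1].strip():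
--     i -= 1
--   return strs[:i]
-- ===== Notes on version B (the rewrite author's own statement) =====
-- stated objective: simpler
-- what changed: Instead of repeatedly slicing the last element off the list, B scans an index backwards over the trailing blank strings and takes one single slice strs[:i].
import Mathlib
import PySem

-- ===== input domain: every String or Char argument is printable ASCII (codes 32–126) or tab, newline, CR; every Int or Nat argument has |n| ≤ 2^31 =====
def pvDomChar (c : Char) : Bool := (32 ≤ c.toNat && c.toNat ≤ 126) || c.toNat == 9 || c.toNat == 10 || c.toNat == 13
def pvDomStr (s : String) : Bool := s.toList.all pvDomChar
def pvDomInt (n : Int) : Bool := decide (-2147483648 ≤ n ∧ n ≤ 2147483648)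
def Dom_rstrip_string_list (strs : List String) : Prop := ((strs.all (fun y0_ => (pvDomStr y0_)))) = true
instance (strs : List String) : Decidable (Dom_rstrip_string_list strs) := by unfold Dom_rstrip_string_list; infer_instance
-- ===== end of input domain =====

-- B replaces A's repeated slicing of the last element by a backward index scan and one final slice (simpler).

-- ===== PORT A =====
-- A's while loop: pop strs[:-1] while the last element strips to empty.
def rstrip_string_list (strs : List String) : List String :=
  if strs.length > 0 then
    match PySem.List.pyGet? strs (-1) with
    | some last =>
      if PySem.Str.len (PySem.Str.strip last) = 0 then
        rstrip_string_list (PySem.List.slice strs none (some (-1)))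
      else strs
    | none => strs
  else strs
termination_by strs.length
decreasing_by
  simp only [PySem.List.slice_to_neg_one, List.length_dropLast]
  omega

-- ===== PORT B =====
-- B's while loop: decrement i past trailing blanks.
def rstripCut (strs : List String) (i : Nat) : Nat :=
  if i > 0 then
    match strs[i - 1]? with
    | some s => if PySem.Str.len (PySem.Str.strip s) = 0 then rstripCut strs (i - 1) else i
    | none => i
  else i
termination_by i

def rstrip_string_list_alt (strs : List String) : List String :=
  PySem.List.slice strs none (some ((rstripCut strs strs.length : Nat) : Int))

-- ===== PRECONDITION & SPEC =====
def Spec_rstrip_string_list (strs : List String) (out : List String) : Prop := out = rstrip_string_list_alt strs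
instance (strs : List String) (out : List String) : Decidable (Spec_rstrip_string_list strs out) := by unfold Spec_rstrip_string_list; infer_instance

-- ===== CLAIM (what is proved, stated in full; the proofs are below) =====
def Claim_equal_rstrip_string_list : Prop := ∀ (strs : List String), Dom_rstrip_string_list strs → Spec_rstrip_string_list strs (rstrip_string_list strs)

-- ===== LEMMAS AND PROOFS =====

-- the blank predicate both loops test
def pvBlank (s : String) : Bool := PySem.Str.len (PySem.Str.strip s) = 0

-- canonical form: drop blanks from the reversed list, then restore order
def pvCanon (l : List String) : List String := (l.reverse.dropWhile pvBlank).reverse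

theorem pvGetLast (xs : List String) (x : String) :
    PySem.List.pyGet? (xs ++ [x]) (-1) = some x := by
  simp [PySem.List.pyGet?, PySem.List.pyIdx?]

theorem blank_iff (s : String) :
    (PySem.Str.len (PySem.Str.strip s) = 0) ↔ PySem.Chars.strip s.toList = [] := by
  rw [PySem.Str.len_eq, ← PySem.Str.toList_strip]
  simp [List.length_eq_zero_iff]

theorem A_eq_canon (l : List String) : rstrip_string_list l = pvCanon l := by
  induction l using List.reverseRecOn with
  | nil => simp [rstrip_string_list, pvCanon]
  | append_singleton xs x ih =>
    rw [rstrip_string_list]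
    simp only [List.length_append, List.length_singleton, pvGetLast,
      PySem.List.slice_to_neg_one, List.dropLast_concat]
    by_cases hb : PySem.Str.len (PySem.Str.strip x) = 0
    · have hb' := (blank_iff x).mp hb
      simp [hb', ih, pvCanon, pvBlank]
    · have hb' : ¬ PySem.Chars.strip x.toList = [] := fun h => hb ((blank_iff x).mpr h)
      simp [pvCanon, pvBlank, hb']

theorem cut_le (l : List String) (i : Nat) : rstripCut l i ≤ i := by
  induction i using Nat.strong_induction_on with
  | _ i ih =>
    rw [rstripCut]
    split
    · split
      · split
        · exact le_trans (ih _ (by omega)) (by omega)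
        · exact le_refl _
      · exact le_refl _
    · exact le_refl _

theorem cut_append (xs ys : List String) (j : Nat) (hj : j ≤ xs.length) :
    rstripCut (xs ++ ys) j = rstripCut xs j := by
  induction j using Nat.strong_induction_on with
  | _ j ih =>
    conv_lhs => rw [rstripCut]
    conv_rhs => rw [rstripCut]
    split_ifs with h
    · rw [List.getElem?_append_left (by omega)]
      cases hx : xs[j - 1]? with
      | none => rfl
      | some s =>
        dsimp only
        split_ifs with hs
        · exact ih _ (by omega) (by omega)
        · rfl
    · rfl

theorem B_eq_canon (l : List String) :
    l.take (rstripCut l l.length) = pvCanon l := by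
  induction l using List.reverseRecOn with
  | nil => simp [rstripCut, pvCanon]
  | append_singleton xs x ih =>
    rw [rstripCut]
    have hlen : (xs ++ [x]).length = xs.length + 1 := by simp
    simp only [hlen]
    have hget : (xs ++ [x])[xs.length + 1 - 1]? = some x := by
      simp
    simp only [Nat.add_sub_cancel] at hget ⊢
    rw [if_pos (by omega), hget]
    dsimp only
    by_cases hb : PySem.Str.len (PySem.Str.strip x) = 0
    · rw [if_pos hb, cut_append xs [x] xs.length le_rfl,
        List.take_append_of_le_length (cut_le xs xs.length), ih]
      have hb' := (blank_iff x).mp hb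
      simp [pvCanon, pvBlank, hb']
    · rw [if_neg hb]
      have hb' : ¬ PySem.Chars.strip x.toList = [] := fun h => hb ((blank_iff x).mpr h)
      simp [pvCanon, pvBlank, hb']

-- ===== VERDICT (by name: the statement is the Claim_ definition above) =====
theorem rstrip_string_list_spec : Claim_equal_rstrip_string_list := by
  intro strs _
  unfold Spec_rstrip_string_list rstrip_string_list_alt
  rw [PySem.List.slice_to_natCast, A_eq_canon, B_eq_canon]
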